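-- pv_equiv track=rewrite | github.com/CodeCr4fter/genetic_algorithms | main.py | define_charset
-- ===== SOURCE A (Python) =====
-- import string
--
-- def define_charset(word):
--     charset = []
--     if any(char.isdigit() for char in word):
--         charset += string.digits
--     if any(char == char.lower() for char in word):
--         charset += string.ascii_lowercase
--     if any(char.isspace() for char in word):
--         charset += " "
--     if any(char == char.upper() for char in word):
--         charset += string.ascii_uppercase
--     return charset
-- ===== SOURCE B (Python) =====
-- import string
--
-- def define_charset(word):
--     # One pass with four flags instead of four any-scans, then build the list.
--     has_digit = has_lower = has_space = has_upper = False
--     for char in word: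
--         if char.isdigit():
--             has_digit = True
--         if char == char.lower():
--             has_lower = True
--         if char.isspace():
--             has_space = True
--         if char == char.upper():
--             has_upper = True
--     out = []
--     if has_digit:
--         out.extend(string.digits)
--     if has_lower:
--         out.extend(string.ascii_lowercase)
--     if has_space:
--         out.append(" ")
--     if has_upper:
--         out.extend(string.ascii_uppercase)
--     return out
-- ===== Notes on version B (the rewrite author's own statement) =====
-- stated objective: simpler
-- what changed: Replaces four separate any() scans over the word by a single loop maintaining four boolean flags, then assembles the charset from the flags.
import Mathlib
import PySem

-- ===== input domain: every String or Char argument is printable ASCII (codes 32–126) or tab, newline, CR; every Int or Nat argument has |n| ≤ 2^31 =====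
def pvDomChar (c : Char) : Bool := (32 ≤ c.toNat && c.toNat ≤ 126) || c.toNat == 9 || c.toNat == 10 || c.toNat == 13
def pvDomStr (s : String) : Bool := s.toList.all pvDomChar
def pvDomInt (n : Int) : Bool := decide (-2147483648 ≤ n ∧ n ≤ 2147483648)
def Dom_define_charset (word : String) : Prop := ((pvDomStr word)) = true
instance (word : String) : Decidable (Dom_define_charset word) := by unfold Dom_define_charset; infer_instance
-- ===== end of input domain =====

-- B replaces A's four any() scans of the word by one pass keeping four boolean flags (simpler, one traversal).


-- string.digits / string.ascii_lowercase / string.ascii_uppercase as lists of 1-char strings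
def pvDigits : List String := "0123456789".toList.map (fun c => String.ofList [c])
def pvLowers : List String := "abcdefghijklmnopqrstuvwxyz".toList.map (fun c => String.ofList [c])
def pvUppers : List String := "ABCDEFGHIJKLMNOPQRSTUVWXYZ".toList.map (fun c => String.ofList [c])

-- ===== PORT A =====
def define_charset (word : String) : List String :=
  let charset : List String := []
  let charset := if word.toList.any (fun c => PySem.Chars.isdigit c) then charset ++ pvDigits else charset
  let charset := if word.toList.any (fun c => c == PySem.Chars.lowerChar c) then charset ++ pvLowers else charset
  let charset := if word.toList.any (fun c => PySem.Chars.isspace c) then charset ++ [" "] else charset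
  let charset := if word.toList.any (fun c => c == PySem.Chars.upperChar c) then charset ++ pvUppers else charset
  charset

-- ===== PORT B =====
def define_charset_alt (word : String) : List String :=
  let flags := word.toList.foldl
    (fun (f : Bool × Bool × Bool × Bool) c =>
      (f.1 || PySem.Chars.isdigit c,
       f.2.1 || c == PySem.Chars.lowerChar c,
       f.2.2.1 || PySem.Chars.isspace c,
       f.2.2.2 || c == PySem.Chars.upperChar c))
    (false, false, false, false)
  (if flags.1 then pvDigits else []) ++
  (if flags.2.1 then pvLowers else []) ++
  (if flags.2.2.1 then [" "] else []) ++
  (if flags.2.2.2 then pvUppers else [])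

-- ===== PRECONDITION & SPEC =====
def Spec_define_charset (word : String) (out : List String) : Prop := out = define_charset_alt word
instance (word : String) (out : List String) : Decidable (Spec_define_charset word out) := by unfold Spec_define_charset; infer_instance

-- ===== CLAIM (what is proved, stated in full; the proofs are below) =====
def Claim_equal_define_charset : Prop := ∀ (word : String), Dom_define_charset word → Spec_define_charset word (define_charset word)

-- ===== LEMMAS AND PROOFS =====

-- the four-flag fold computes exactly the four any-scans
theorem foldl_flags (l : List Char)
    (p q r s : Char → Bool) (a b c d : Bool) :
    l.foldl (fun (f : Bool × Bool × Bool × Bool) ch =>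
        (f.1 || p ch, f.2.1 || q ch, f.2.2.1 || r ch, f.2.2.2 || s ch)) (a, b, c, d)
      = (a || l.any p, b || l.any q, c || l.any r, d || l.any s) := by
  induction l generalizing a b c d with
  | nil => simp
  | cons ch t ih => simp [List.foldl_cons, ih, Bool.or_assoc]

-- ===== VERDICT (by name: the statement is the Claim_ definition above) =====
theorem define_charset_spec : Claim_equal_define_charset := by
  intro word _
  unfold Spec_define_charset define_charset define_charset_alt
  rw [foldl_flags]
  simp only [Bool.false_or]
  split_ifs <;> simp
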